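-- pv_equiv track=rewrite | github.com/zombie-zero-nust/zombie-zero | tools/uml/generate_src_uml_assets.py | build_package_maps
-- ===== SOURCE A (Python) =====
-- from collections import defaultdict, deque
--
-- def build_package_maps(entities):
--     package_entities = defaultdict(set)
--     package_children = defaultdict(set)
--     packages = set()
--     for entity in entities:
--         package = entity['package']
--         package_entities[package].add(entity['full_name'])
--         segments = package.split('.')
--         for index in range(len(segments)):
--             current = '.'.join(segments[: index + 1])
--             packages.add(current)
--             if index > 0:
--                 parent = '.'.join(segments[:index])
--                 package_children[parent].add(current)
--     return package_entities, package_children, packages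
-- ===== SOURCE B (Python) =====
-- from collections import defaultdict
--
-- def build_package_maps(entities):
--     package_entities = defaultdict(set)
--     seen = {}
--     for entity in entities:
--         package = entity['package']
--         package_entities[package].add(entity['full_name'])
--         seen[package] = None
--     package_children = defaultdict(set)
--     packages = set()
--     for package in seen:
--         prefix = None
--         for segment in package.split('.'):
--             parent = prefix
--             prefix = segment if parent is None else parent + '.' + segment
--             packages.add(prefix)
--             if parent is not None:
--                 package_children[parent].add(prefix)
--     return package_entities, package_children, packages
-- ===== Notes on version B (the rewrite author's own statement) =====
-- stated objective: alternative
-- what changed: Single interleaved pass (re-splitting the package and re-joining prefix slices for every entity, duplicates included) is replaced by two differently-shaped passes: one pass groups entities and collects the distinct packages in first-seen order, a second pass over only the deduped packages builds each cumulative prefix incrementally with a running string instead of '.'.join(segments[:i+1]) slices.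
import Mathlib
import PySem

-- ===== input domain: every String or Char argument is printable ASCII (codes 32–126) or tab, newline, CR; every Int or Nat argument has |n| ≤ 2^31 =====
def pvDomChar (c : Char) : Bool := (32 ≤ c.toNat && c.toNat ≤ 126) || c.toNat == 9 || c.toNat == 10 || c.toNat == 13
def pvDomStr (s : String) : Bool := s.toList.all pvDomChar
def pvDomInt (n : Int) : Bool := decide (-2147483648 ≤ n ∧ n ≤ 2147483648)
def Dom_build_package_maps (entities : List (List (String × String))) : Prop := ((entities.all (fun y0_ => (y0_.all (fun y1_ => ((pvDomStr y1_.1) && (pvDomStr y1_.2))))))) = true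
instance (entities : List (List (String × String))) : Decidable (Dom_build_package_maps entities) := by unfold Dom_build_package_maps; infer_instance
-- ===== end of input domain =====

-- B replaces A's single interleaved pass by two passes: group entities and collect the distinct
-- packages in first-seen order, then walk only the deduped packages building each prefix
-- incrementally; alternative decomposition, same return value.
-- (Python's defaultdicts/sets are modelled as insertion-ordered assoc lists / dedup lists.)

-- shared accessors: entity['package'] / entity['full_name'] (total form, exact under Pre_)
def pvPkgOf (entity : List (String × String)) : String :=
  (PySem.Dict.ofList entity).getD "package" ""
def pvFullOf (entity : List (String × String)) : String :=
  (PySem.Dict.ofList entity).getD "full_name" ""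

-- ===== PORT A =====
-- A's inner loop: for index in range(len(segments)): current = '.'.join(segments[:index+1]); …
def pvStepPkgA (st : PySem.Dict String (PySem.Set String) × PySem.Set String) (package : String) :
    PySem.Dict String (PySem.Set String) × PySem.Set String :=
  let segments := (PySem.Str.split? package ".").getD []   -- sep "." ≠ "", so getD is exact
  (PySem.List.pyRange 0 (segments.length : Int) 1).foldl (fun st index =>
    let current := PySem.Str.join "." (PySem.List.slice segments none (some (index + 1)))
    let packages := PySem.Set.add st.2 current
    let package_children :=
      if 0 < index then
        PySem.Dict.modify st.1 (PySem.Str.join "." (PySem.List.slice segments none (some index)))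
          PySem.Set.empty (fun s => PySem.Set.add s current)
      else st.1
    (package_children, packages)) st

def build_package_maps (entities : List (List (String × String))) :
    (List (String × List String)) × (List (String × List String)) × List String :=
  let res := entities.foldl (fun (st : PySem.Dict String (PySem.Set String) ×
        (PySem.Dict String (PySem.Set String) × PySem.Set String)) entity =>
      (PySem.Dict.modify st.1 (pvPkgOf entity) PySem.Set.empty
         (fun s => PySem.Set.add s (pvFullOf entity)),
       pvStepPkgA st.2 (pvPkgOf entity)))
    (PySem.Dict.empty, (PySem.Dict.empty, PySem.Set.empty))
  (res.1.items, res.2.1.items, res.2.2)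

-- ===== PORT B =====
-- B's inner loop: running prefix over the segments of ONE package
def pvStepPkgB (st : PySem.Dict String (PySem.Set String) × PySem.Set String) (package : String) :
    PySem.Dict String (PySem.Set String) × PySem.Set String :=
  (((PySem.Str.split? package ".").getD []).foldl
    (fun (acc : (PySem.Dict String (PySem.Set String) × PySem.Set String) × Option String) segment =>
      let parent := acc.2
      let pfx := match parent with
        | none => segment
        | some p => p ++ "." ++ segment
      let packages := PySem.Set.add acc.1.2 pfx
      let package_children := match parent with
        | none => acc.1.1
        | some p => PySem.Dict.modify acc.1.1 p PySem.Set.empty (fun s => PySem.Set.add s pfx)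
      ((package_children, packages), some pfx))
    (st, (none : Option String))).1

def build_package_maps_alt (entities : List (List (String × String))) :
    (List (String × List String)) × (List (String × List String)) × List String :=
  -- pass 1: group full names by package, record distinct packages in first-seen order
  let pass1 := entities.foldl (fun (st : PySem.Dict String (PySem.Set String) × PySem.Set String) entity =>
      (PySem.Dict.modify st.1 (pvPkgOf entity) PySem.Set.empty
         (fun s => PySem.Set.add s (pvFullOf entity)),
       PySem.Set.add st.2 (pvPkgOf entity)))
    (PySem.Dict.empty, PySem.Set.empty)
  -- pass 2: walk only the deduped packages
  let pass2 := pass1.2.foldl pvStepPkgB (PySem.Dict.empty, PySem.Set.empty)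
  (pass1.1.items, pass2.1.items, pass2.2)

-- ===== PRECONDITION & SPEC =====
-- Pre_ excludes exactly the entities lacking a 'package' or 'full_name' key, where Python A raises KeyError.
def Pre_build_package_maps (entities : List (List (String × String))) : Prop :=
  (entities.all (fun e => (PySem.Dict.ofList e).contains "package" &&
                          (PySem.Dict.ofList e).contains "full_name")) = true
instance (entities : List (List (String × String))) : Decidable (Pre_build_package_maps entities) := by
  unfold Pre_build_package_maps; infer_instance

def pvWitness_build_package_maps : (List (List (String × String))) :=
  [[("package", "a.b"), ("full_name", "a.b.C")], [("package", "a"), ("full_name", "a.D")]]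

def Spec_build_package_maps (entities : List (List (String × String)))
    (out : (List (String × List String)) × (List (String × List String)) × List String) : Prop :=
  out = build_package_maps_alt entities
instance (entities : List (List (String × String)))
    (out : (List (String × List String)) × (List (String × List String)) × List String) :
    Decidable (Spec_build_package_maps entities out) := by
  unfold Spec_build_package_maps; infer_instance

-- ===== CLAIM (what is proved, stated in full; the proofs are below) =====
def Claim_equal_build_package_maps : Prop := ∀ (entities : List (List (String × String))), Dom_build_package_maps entities → Pre_build_package_maps entities → Spec_build_package_maps entities (build_package_maps entities)

-- ===== LEMMAS AND PROOFS =====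

-- '.'-joining, and the (parent, current) pairs produced while walking one package's segments
def pvJS (xs : List String) : String := PySem.Str.join "." xs

def pvJoinOpt (pfx : Option String) (s : String) : String :=
  match pfx with
  | none => s
  | some p => p ++ "." ++ s

def pvChain (pfx : Option String) : List String → List (Option String × String)
  | [] => []
  | s :: rest => (pfx, pvJoinOpt pfx s) :: pvChain (some (pvJoinOpt pfx s)) rest

-- the common one-pair step both inner loops reduce to
def pvCStep (st : PySem.Dict String (PySem.Set String) × PySem.Set String)
    (pr : Option String × String) : PySem.Dict String (PySem.Set String) × PySem.Set String :=
  (match pr.1 with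
   | none => st.1
   | some q => PySem.Dict.modify st.1 q PySem.Set.empty (fun s => PySem.Set.add s pr.2),
   PySem.Set.add st.2 pr.2)

def pvPairAt (segs : List String) (k : Nat) : Option String × String :=
  ((if k = 0 then none else some (pvJS (segs.take k))), pvJS (segs.take (k + 1)))

-- every prefix/child of package p is already recorded in the state
def pvDoneC (p : String) (st : PySem.Dict String (PySem.Set String) × PySem.Set String) : Prop :=
  ∀ pr ∈ pvChain none ((PySem.Str.split? p ".").getD []),
    pr.2 ∈ st.2 ∧ ∀ q, pr.1 = some q → pr.2 ∈ st.1.getD q PySem.Set.empty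

-- the packages of ps not yet in seen, in first-occurrence order
def pvNew (seen : List String) : List String → List String
  | [] => []
  | p :: ps => if PySem.Set.contains seen p then pvNew seen ps
               else p :: pvNew (PySem.Set.add seen p) ps

theorem pvChars_join_snoc (sep y : List Char) :
    ∀ (xs : List (List Char)), xs ≠ [] →
      PySem.Chars.join sep (xs ++ [y]) = PySem.Chars.join sep xs ++ sep ++ y
  | [], h => absurd rfl h
  | [a], _ => by
      simp [PySem.Chars.join_cons_cons, PySem.Chars.join_singleton]
  | a :: b :: r, _ => by
      have ih := pvChars_join_snoc sep y (b :: r) (by simp)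
      simp only [List.cons_append, PySem.Chars.join_cons_cons] at *
      simp [ih]

theorem pvJS_snoc (xs : List String) (y : String) (h : xs ≠ []) :
    pvJS (xs ++ [y]) = pvJS xs ++ "." ++ y := by
  apply String.toList_inj.mp
  simp only [pvJS, String.toList_append, PySem.Str.toList_join, List.map_append, List.map_cons,
    List.map_nil]
  exact pvChars_join_snoc _ _ _ (by simpa using h)

theorem pvJS_singleton (s : String) : pvJS [s] = s := by
  apply String.toList_inj.mp
  simp [pvJS, PySem.Str.toList_join, PySem.Chars.join_singleton]

theorem pvChain_some_eq_map (rest : List String) : ∀ (pre : List String), pre ≠ [] →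
    pvChain (some (pvJS pre)) rest =
      (List.range rest.length).map
        (fun i => (some (pvJS (pre ++ rest.take i)), pvJS (pre ++ rest.take (i + 1)))) := by
  induction rest with
  | nil => intro pre _; rfl
  | cons s r ih =>
    intro pre hpre
    have hsnoc : pvJoinOpt (some (pvJS pre)) s = pvJS (pre ++ [s]) := (pvJS_snoc pre s hpre).symm
    have ih' := ih (pre ++ [s]) (by simp)
    simp only [pvChain, hsnoc, ih', List.length_cons, List.range_succ_eq_map, List.map_cons,
      List.map_map]
    rw [List.cons_eq_cons]
    constructor
    · simp
    · apply List.map_congr_left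
      intro i _
      simp [List.take_succ_cons, Function.comp, List.append_assoc]

theorem pvChain_eq_map (segs : List String) :
    pvChain none segs = (List.range segs.length).map (pvPairAt segs) := by
  cases segs with
  | nil => rfl
  | cons s r =>
    simp only [pvChain, pvJoinOpt] at *
    rw [show (some s) = some (pvJS [s]) from by rw [pvJS_singleton],
        pvChain_some_eq_map r [s] (by simp)]
    simp only [List.length_cons, List.range_succ_eq_map, List.map_cons, List.map_map]
    rw [List.cons_eq_cons]
    constructor
    · simp [pvPairAt, pvJS_singleton]
    · apply List.map_congr_left
      intro i _
      simp [pvPairAt, List.take_succ_cons, Function.comp]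

theorem pvStepPkgA_eq_chain (st) (p : String) :
    pvStepPkgA st p = (pvChain none ((PySem.Str.split? p ".").getD [])).foldl pvCStep st := by
  unfold pvStepPkgA
  generalize ((PySem.Str.split? p ".").getD []) = segs
  dsimp only
  rw [pvChain_eq_map, List.foldl_map]
  rw [PySem.List.pyRange_one]
  simp only [Int.sub_zero, Int.toNat_natCast]
  rw [List.foldl_map]
  congr 1
  funext st k
  have hsl : ∀ (m : Int), 0 ≤ m → PySem.List.slice segs none (some m) = segs.take m.toNat :=
    fun m hm => PySem.List.slice_to segs hm
  rw [hsl (0 + (k:Int) + 1) (by omega), hsl (0 + (k:Int)) (by omega)]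
  have e1 : ((0:Int) + (k:Int) + 1).toNat = k + 1 := by omega
  have e2 : ((0:Int) + (k:Int)).toNat = k := by omega
  rw [e1, e2]
  by_cases hk : k = 0
  · subst hk
    rw [if_neg (by omega)]
    simp [pvCStep, pvPairAt, pvJS]
  · rw [if_pos (by have := Nat.pos_of_ne_zero hk; omega)]
    simp [pvCStep, pvPairAt, pvJS, hk]

theorem pvStepPkgB_eq_chain (st) (p : String) :
    pvStepPkgB st p = (pvChain none ((PySem.Str.split? p ".").getD [])).foldl pvCStep st := by
  unfold pvStepPkgB
  generalize ((PySem.Str.split? p ".").getD []) = segs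
  dsimp only
  suffices h : ∀ (segs : List String) (st) (pfx : Option String),
      (segs.foldl
        (fun (acc : (PySem.Dict String (PySem.Set String) × PySem.Set String) × Option String) segment =>
          ((match acc.2 with
            | none => acc.1.1
            | some p => PySem.Dict.modify acc.1.1 p PySem.Set.empty
                (fun s => PySem.Set.add s (pvJoinOpt acc.2 segment)),
            PySem.Set.add acc.1.2 (pvJoinOpt acc.2 segment)), some (pvJoinOpt acc.2 segment)))
        (st, pfx)).1 = (pvChain pfx segs).foldl pvCStep st by
    exact h segs st none
  intro segs
  induction segs with
  | nil => intro st pfx; rfl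
  | cons s r ih =>
    intro st pfx
    simp only [List.foldl_cons, pvChain, pvCStep]
    exact ih _ _

-- single-step and fold monotonicity of the recorded memberships
theorem pvCStep_mem2 {st pr x} (h : x ∈ st.2) : x ∈ (pvCStep st pr).2 := by
  simp only [pvCStep]
  exact (PySem.Set.mem_add _ _ _).mpr (Or.inl h)

theorem pvCStep_mem1 {st pr q x} (h : x ∈ st.1.getD q PySem.Set.empty) :
    x ∈ (pvCStep st pr).1.getD q PySem.Set.empty := by
  simp only [pvCStep]
  cases hpr : pr.1 with
  | none => exact h
  | some k =>
    rw [PySem.Dict.getD_modify]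
    by_cases hq : q = k
    · subst hq
      rw [if_pos rfl]
      exact (PySem.Set.mem_add _ _ _).mpr (Or.inl h)
    · rw [if_neg hq]; exact h

theorem pvFold_mem2 (prs : List (Option String × String)) :
    ∀ st x, x ∈ st.2 → x ∈ (prs.foldl pvCStep st).2 := by
  induction prs with
  | nil => intro st x h; exact h
  | cons pr rest ih => intro st x h; exact ih _ _ (pvCStep_mem2 h)

theorem pvFold_mem1 (prs : List (Option String × String)) :
    ∀ st q x, x ∈ st.1.getD q PySem.Set.empty → x ∈ (prs.foldl pvCStep st).1.getD q PySem.Set.empty := by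
  induction prs with
  | nil => intro st q x h; exact h
  | cons pr rest ih => intro st q x h; exact ih _ _ _ (pvCStep_mem1 h)

-- after folding a chain, every pair of it is recorded
theorem pvFold_done (prs : List (Option String × String)) :
    ∀ st pr, pr ∈ prs →
      pr.2 ∈ (prs.foldl pvCStep st).2 ∧
      ∀ q, pr.1 = some q → pr.2 ∈ (prs.foldl pvCStep st).1.getD q PySem.Set.empty := by
  induction prs with
  | nil => intro st pr h; simp at h
  | cons hd rest ih =>
    intro st pr h
    rcases List.mem_cons.mp h with rfl | hmem
    · constructor
      · exact pvFold_mem2 rest _ _ (by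
          simp only [pvCStep]
          exact (PySem.Set.mem_add _ _ _).mpr (Or.inr rfl))
      · intro q hq
        apply pvFold_mem1 rest
        simp only [pvCStep, hq]
        rw [PySem.Dict.getD_modify, if_pos rfl]
        exact (PySem.Set.mem_add _ _ _).mpr (Or.inr rfl)
    · exact ih _ _ hmem

-- modify with an already-present element is the identity (needs unique keys)
theorem pvModify_id (d : PySem.Dict String (PySem.Set String)) (q x : String)
    (hnd : d.keys.Nodup) (h : x ∈ d.getD q PySem.Set.empty) :
    d.modify q PySem.Set.empty (fun s => PySem.Set.add s x) = d := by
  have hc : d.contains q = true := by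
    by_contra hc
    have : d.contains q = false := by simpa using hc
    rw [PySem.Dict.getD_of_not_contains d _ this] at h
    simp [PySem.Set.empty] at h
  obtain ⟨v, hv⟩ : ∃ v, d.get? q = some v := by
    cases hg : d.get? q with
    | none => rw [PySem.Dict.get?_eq_none_iff_contains] at hg; rw [hg] at hc; simp at hc
    | some v => exact ⟨v, rfl⟩
  have hgd : d.getD q PySem.Set.empty = v := PySem.Dict.getD_of_get?_eq_some d _ hv
  have hadd : PySem.Set.add v x = v := PySem.Set.add_of_mem (hgd ▸ h)
  show d.insert q (PySem.Set.add (d.getD q PySem.Set.empty) x) = d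
  rw [hgd, hadd]
  apply PySem.Dict.ext
  rw [PySem.Dict.items_insert_of_contains d v hc]
  have : ∀ p ∈ d.items, (if p.1 == q then (q, v) else p) = p := by
    intro p hp
    by_cases hpq : p.1 = q
    · have : d.get? p.1 = some p.2 := PySem.Dict.get?_of_mem_items d (by simpa using hp) hnd
      rw [hpq, hv] at this
      simp only [hpq, beq_self_eq_true, if_pos]
      cases p; simp_all
    · simp [hpq]
  rw [List.map_congr_left this]
  exact List.map_id _

theorem pvNodup_modify (d : PySem.Dict String (PySem.Set String)) (q : String) (f)
    (hnd : d.keys.Nodup) : (d.modify q PySem.Set.empty f).keys.Nodup := by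
  rw [PySem.Dict.keys_modify]
  by_cases hc : d.contains q = true
  · rw [PySem.Dict.keys_insert_of_contains d _ hc]; exact hnd
  · have hc' : d.contains q = false := by simpa using hc
    rw [PySem.Dict.keys_insert_of_not_contains d _ hc']
    have : q ∉ d.keys := fun hm => by
      rw [(PySem.Dict.contains_iff_mem_keys d q).mpr hm] at hc'; simp at hc'
    rw [List.nodup_append]
    refine ⟨hnd, by simp, ?_⟩
    intro a ha b hb
    simp only [List.mem_singleton] at hb
    subst hb
    exact fun h => this (h ▸ ha)

theorem pvCStep_nodup {st} (pr) (hnd : st.1.keys.Nodup) : (pvCStep st pr).1.keys.Nodup := by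
  simp only [pvCStep]
  cases pr.1 with
  | none => exact hnd
  | some q => exact pvNodup_modify _ _ _ hnd

theorem pvFold_nodup (prs : List (Option String × String)) :
    ∀ st, st.1.keys.Nodup → ((prs.foldl pvCStep st).1).keys.Nodup := by
  induction prs with
  | nil => intro st h; exact h
  | cons pr rest ih => intro st h; exact ih _ (pvCStep_nodup pr h)

-- if every pair of the chain is already recorded, the fold is the identity
theorem pvFold_id (prs : List (Option String × String)) :
    ∀ st, st.1.keys.Nodup →
      (∀ pr ∈ prs, pr.2 ∈ st.2 ∧ ∀ q, pr.1 = some q → pr.2 ∈ st.1.getD q PySem.Set.empty) →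
      prs.foldl pvCStep st = st := by
  induction prs with
  | nil => intro st _ _; rfl
  | cons hd rest ih =>
    intro st hnd hall
    obtain ⟨h2, h1⟩ := hall hd (List.mem_cons_self ..)
    have hstep : pvCStep st hd = st := by
      simp only [pvCStep]
      have hs2 : PySem.Set.add st.2 hd.2 = st.2 := PySem.Set.add_of_mem h2
      rw [hs2]
      cases hhd : hd.1 with
      | none => rfl
      | some q =>
        rw [show (match some q with
              | none => st.1
              | some q => st.1.modify q PySem.Set.empty fun s => s.add hd.2) =
            st.1.modify q PySem.Set.empty fun s => s.add hd.2 from rfl,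
          pvModify_id st.1 q hd.2 hnd (h1 q hhd)]
    rw [List.foldl_cons, hstep]
    exact ih st hnd (fun pr hpr => hall pr (List.mem_cons_of_mem _ hpr))

theorem pvContains_iff (s : PySem.Set String) (x : String) :
    PySem.Set.contains s x = true ↔ x ∈ s := by
  simp [PySem.Set.contains]

theorem pvAdd_not_mem (s : PySem.Set String) (x : String)
    (h : ¬ PySem.Set.contains s x = true) : PySem.Set.add s x = s ++ [x] := by
  simp only [PySem.Set.add]
  rw [if_neg h]

-- MAIN INVARIANT: folding A's per-package step over all packages equals folding B's step
-- over only the not-yet-seen ones, provided everything in seen is already recorded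
theorem pvCore (ps : List String) :
    ∀ (st : PySem.Dict String (PySem.Set String) × PySem.Set String) (seen : List String),
      st.1.keys.Nodup → (∀ p ∈ seen, pvDoneC p st) →
      ps.foldl pvStepPkgA st = (pvNew seen ps).foldl pvStepPkgB st := by
  induction ps with
  | nil => intro st seen _ _; rfl
  | cons p ps ih =>
    intro st seen hnd hdone
    by_cases hc : PySem.Set.contains seen p = true
    · have hmem : p ∈ seen := (pvContains_iff seen p).mp hc
      have hid : pvStepPkgA st p = st := by
        rw [pvStepPkgA_eq_chain]
        exact pvFold_id _ st hnd (hdone p hmem)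
      rw [List.foldl_cons, hid, pvNew, if_pos hc]
      exact ih st seen hnd hdone
    · rw [List.foldl_cons, pvNew, if_neg hc, List.foldl_cons]
      have hAB : pvStepPkgB st p = pvStepPkgA st p := by
        rw [pvStepPkgB_eq_chain, pvStepPkgA_eq_chain]
      rw [hAB]
      apply ih
      · rw [pvStepPkgA_eq_chain]
        exact pvFold_nodup _ st hnd
      · intro q hq
        rw [pvAdd_not_mem seen p hc] at hq
        rcases List.mem_append.mp hq with hq | hq
        · intro pr hpr
          obtain ⟨h2, h1⟩ := hdone q hq pr hpr
          rw [pvStepPkgA_eq_chain]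
          exact ⟨pvFold_mem2 _ _ _ h2, fun r hr => pvFold_mem1 _ _ _ _ (h1 r hr)⟩
        · simp only [List.mem_singleton] at hq
          subst hq
          intro pr hpr
          rw [pvStepPkgA_eq_chain]
          exact pvFold_done _ st pr hpr

theorem pvOfList_delta (ps : List String) :
    ∀ (seen : List String), ps.foldl PySem.Set.add seen = seen ++ pvNew seen ps := by
  induction ps with
  | nil => intro seen; simp [pvNew]
  | cons p ps ih =>
    intro seen
    by_cases hc : PySem.Set.contains seen p = true
    · have : PySem.Set.add seen p = seen := by simp only [PySem.Set.add]; rw [if_pos hc]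
      rw [List.foldl_cons, this, pvNew, if_pos hc, ih]
    · rw [List.foldl_cons, pvNew, if_neg hc, ih (PySem.Set.add seen p), pvAdd_not_mem seen p hc]
      simp

-- the entity folds of A and B split componentwise (and their first components coincide)
theorem pvSplitA (entities : List (List (String × String))) :
    ∀ (a : PySem.Dict String (PySem.Set String)) (b : PySem.Dict String (PySem.Set String) × PySem.Set String),
      entities.foldl (fun st entity =>
          (PySem.Dict.modify st.1 (pvPkgOf entity) PySem.Set.empty
             (fun s => PySem.Set.add s (pvFullOf entity)),
           pvStepPkgA st.2 (pvPkgOf entity))) (a, b) =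
      (entities.foldl (fun pe entity => PySem.Dict.modify pe (pvPkgOf entity) PySem.Set.empty
          (fun s => PySem.Set.add s (pvFullOf entity))) a,
       entities.foldl (fun st entity => pvStepPkgA st (pvPkgOf entity)) b) := by
  induction entities with
  | nil => intro a b; rfl
  | cons e es ih => intro a b; simp only [List.foldl_cons]; exact ih _ _

theorem pvSplitB (entities : List (List (String × String))) :
    ∀ (a : PySem.Dict String (PySem.Set String)) (b : PySem.Set String),
      entities.foldl (fun st entity =>
          (PySem.Dict.modify st.1 (pvPkgOf entity) PySem.Set.empty
             (fun s => PySem.Set.add s (pvFullOf entity)),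
           PySem.Set.add st.2 (pvPkgOf entity))) (a, b) =
      (entities.foldl (fun pe entity => PySem.Dict.modify pe (pvPkgOf entity) PySem.Set.empty
          (fun s => PySem.Set.add s (pvFullOf entity))) a,
       entities.foldl (fun st entity => PySem.Set.add st (pvPkgOf entity)) b) := by
  induction entities with
  | nil => intro a b; rfl
  | cons e es ih => intro a b; simp only [List.foldl_cons]; exact ih _ _

theorem pvMain (entities : List (List (String × String))) :
    build_package_maps entities = build_package_maps_alt entities := by
  unfold build_package_maps build_package_maps_alt
  dsimp only
  rw [pvSplitA, pvSplitB]
  have hA2 : entities.foldl (fun st e => pvStepPkgA st (pvPkgOf e))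
      (PySem.Dict.empty, PySem.Set.empty) =
      (entities.map pvPkgOf).foldl pvStepPkgA (PySem.Dict.empty, PySem.Set.empty) := by
    rw [List.foldl_map]
  have hSeen : entities.foldl (fun st e => PySem.Set.add st (pvPkgOf e)) PySem.Set.empty =
      (entities.map pvPkgOf).foldl PySem.Set.add PySem.Set.empty := by
    rw [List.foldl_map]
  rw [hA2, hSeen, pvOfList_delta]
  rw [pvCore (entities.map pvPkgOf) (PySem.Dict.empty, PySem.Set.empty) []
    (by simp [PySem.Dict.empty, PySem.Dict.keys]) (by intro p hp; simp at hp)]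
  rfl

-- ===== VERDICT (by name: the statement is the Claim_ definition above) =====
theorem build_package_maps_spec : Claim_equal_build_package_maps := by
  intro entities _ _
  unfold Spec_build_package_maps
  exact pvMain entities
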